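-- pv_equiv track=rewrite | github.com/bfbachmann/Silver-Screen | sentimentanalysis/analyzer.py | capitalized
-- ===== SOURCE A (Python) =====
-- def capitalized(words):
--     """
--     Checks if specific words are capitalized or the whole tweet,
--     in order to determine whether we should differentiate the word based on its capitalization
--
--     :param list words: the list of words to inspect
--     :returns: True if some but not all of the words in the list are capitalized,
--     False if none or all are capitalized
--     """
--     emphasis = False
--     capitalized_words = 0
--
--     for word in words:
--         if word.isupper():
--             capitalized_words += 1
--     cap_differential = len(words) - capitalized_words
--     if 0 < cap_differential < len(words):
--         emphasis = True
--
--     return emphasis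
-- ===== SOURCE B (Python) =====
-- def capitalized(words):
--     has_upper = any(w.isupper() for w in words)
--     has_lower = any(not w.isupper() for w in words)
--     return has_upper and has_lower
-- ===== Notes on version B (the rewrite author's own statement) =====
-- stated objective: idiomatic
-- what changed: Replaces the counting loop plus range comparison with two short-circuiting existence checks (any uppercase word AND any non-uppercase word).
import Mathlib
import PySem

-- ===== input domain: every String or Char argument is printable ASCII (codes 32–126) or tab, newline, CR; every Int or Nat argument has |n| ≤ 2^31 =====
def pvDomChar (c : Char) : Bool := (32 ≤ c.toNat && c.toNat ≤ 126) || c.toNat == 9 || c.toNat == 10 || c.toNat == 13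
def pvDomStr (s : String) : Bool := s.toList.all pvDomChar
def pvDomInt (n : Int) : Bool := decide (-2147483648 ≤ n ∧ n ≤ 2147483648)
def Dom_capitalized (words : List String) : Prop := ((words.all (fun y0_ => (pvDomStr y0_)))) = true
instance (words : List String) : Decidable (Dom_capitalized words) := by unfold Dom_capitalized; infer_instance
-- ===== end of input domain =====

-- B replaces A's counting loop and numeric range test by two existence checks (idiomatic decomposition).

-- shared helper: Python's str.isupper() — at least one cased (uppercase-able) char and no lowercase char (exact on ASCII)
def pyIsupper (s : String) : Bool :=
  (s.toList.any PySem.Chars.isupper) && (s.toList.all (fun c => !PySem.Chars.islower c))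

-- ===== PORT A =====
def capitalized (words : List String) : Bool :=
  let emphasis := false
  let capitalized_words :=
    words.foldl (fun n word => if pyIsupper word then n + 1 else n) 0
  let cap_differential := words.length - capitalized_words
  let emphasis := if 0 < cap_differential ∧ cap_differential < words.length then true else emphasis
  emphasis

-- ===== PORT B =====
def capitalized_alt (words : List String) : Bool :=
  let has_upper := words.any (fun w => pyIsupper w)
  let has_lower := words.any (fun w => !pyIsupper w)
  has_upper && has_lower

-- ===== PRECONDITION & SPEC =====
def Spec_capitalized (words : List String) (out : Bool) : Prop := out = capitalized_alt words
instance (words : List String) (out : Bool) : Decidable (Spec_capitalized words out) := by unfold Spec_capitalized; infer_instance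

-- ===== CLAIM (what is proved, stated in full; the proofs are below) =====
def Claim_equal_capitalized : Prop := ∀ (words : List String), Dom_capitalized words → Spec_capitalized words (capitalized words)

-- ===== LEMMAS AND PROOFS =====

theorem capitalized_count (words : List String) :
    words.foldl (fun n word => if pyIsupper word then n + 1 else n) 0
      = words.countP (fun w => pyIsupper w) := by
  suffices h : ∀ (k : Nat),
      words.foldl (fun n word => if pyIsupper word then n + 1 else n) k
        = k + words.countP (fun w => pyIsupper w) by
    simpa using h 0
  induction words with
  | nil => intro k; simp
  | cons w ws ih =>
      intro k
      by_cases hw : pyIsupper w = true <;>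
        simp [List.foldl_cons, hw, ih] <;> omega

-- ===== VERDICT (by name: the statement is the Claim_ definition above) =====
theorem capitalized_spec : Claim_equal_capitalized := by
  intro words _
  unfold Spec_capitalized capitalized capitalized_alt
  simp only [capitalized_count]
  have hle : words.countP (fun w => pyIsupper w) ≤ words.length := List.countP_le_length
  have hpos : (words.any (fun w => pyIsupper w)) = true ↔
      0 < words.countP (fun w => pyIsupper w) := by
    rw [List.countP_pos_iff]; simp [List.any_eq_true]
  have hlt : (words.any (fun w => !pyIsupper w)) = true ↔
      words.countP (fun w => pyIsupper w) < words.length := by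
    constructor
    · intro h
      rcases List.any_eq_true.mp h with ⟨w, hw, hne⟩
      rcases Nat.lt_or_ge (words.countP (fun w => pyIsupper w)) words.length with h1 | h1
      · exact h1
      · exfalso
        have := (List.countP_eq_length.mp (Nat.le_antisymm hle h1)) w hw
        simp [this] at hne
    · intro h
      by_contra hna
      have hall : ∀ w ∈ words, pyIsupper w = true := by
        intro w hw
        by_contra hne
        exact hna (List.any_eq_true.mpr ⟨w, hw, by simp [hne]⟩)
      rw [List.countP_eq_length.mpr hall] at h
      omega
  split_ifs with hcond
  · symm
    rw [Bool.and_eq_true, hpos, hlt]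
    omega
  · symm
    rw [Bool.and_eq_false_iff]
    by_contra hc
    push Not at hc
    rcases hc with ⟨h1, h2⟩
    have := hpos.mp (by revert h1; cases words.any (fun w => pyIsupper w) <;> simp)
    have := hlt.mp (by revert h2; cases words.any (fun w => !pyIsupper w) <;> simp)
    omega
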